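-- pv_equiv track=rewrite | github.com/vicety/LeetCode | python/interview/2023-fulltime/bili/1.py | isBad
-- ===== SOURCE A (Python) =====
-- def isBad(seg):
--     if not len(seg):
--         return False
--
--     up = None
--     nowCh = seg[0]
--     idx = 1
--     cnt = 1
--     triggered = False
--     while idx < len(seg):
--         ch = seg[idx]
--         if ord(ch) != ord(nowCh) + 1 and ord(ch) != ord(nowCh) - 1:
--             return False
--         elif up is True and ord(ch) == ord(nowCh) - 1:
--             return False
--         elif up is False and ord(ch) == ord(nowCh) + 1:
--             return False
--         elif (up is None or up is False) and ord(ch) == ord(nowCh) - 1: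
--             up = False
--             nowCh = ch
--             cnt += 1
--             if cnt == 3:
--                 triggered = True
--         elif (up is None or up is True) and ord(ch) == ord(nowCh) + 1:
--             up = True
--             nowCh = ch
--             cnt += 1
--             if cnt == 3:
--                 triggered = True
--         else:
--             return False
--         idx += 1
--
--     return triggered
-- ===== SOURCE B (Python) =====
-- def isBad(seg):
--     if len(seg) < 3:
--         return False
--     d = [ord(seg[i + 1]) - ord(seg[i]) for i in range(len(seg) - 1)]
--     return all(x == 1 for x in d) or all(x == -1 for x in d)
-- ===== Notes on version B (the rewrite author's own statement) =====
-- stated objective: simpler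
-- what changed: Replaced A's stateful single-pass direction machine (up/nowCh/cnt/triggered) with a two-pass formulation: derive the list of consecutive ord differences, then return len>=3 and (all diffs == 1 or all diffs == -1).
import Mathlib
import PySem

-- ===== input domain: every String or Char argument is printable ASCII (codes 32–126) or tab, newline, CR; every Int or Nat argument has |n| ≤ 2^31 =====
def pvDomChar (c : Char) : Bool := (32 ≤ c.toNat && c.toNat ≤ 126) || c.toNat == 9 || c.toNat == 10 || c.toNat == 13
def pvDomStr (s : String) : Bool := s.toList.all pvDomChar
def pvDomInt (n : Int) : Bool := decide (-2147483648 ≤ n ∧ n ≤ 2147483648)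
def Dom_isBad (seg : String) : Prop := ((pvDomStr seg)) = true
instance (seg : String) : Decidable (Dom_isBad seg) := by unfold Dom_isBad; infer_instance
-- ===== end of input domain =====

-- B replaces A's stateful single-pass direction machine (up/nowCh/cnt/triggered) with a two-pass
-- test: derive the consecutive ord-differences, then check len ≥ 3 and all diffs +1 or all -1 (simpler).

-- ord(c) as a Python int
def pvOrd (c : Char) : Int := (c.toNat : Int)

-- ===== PORT A =====
-- the while-loop of A, state (up, nowCh, cnt, triggered), one step per remaining char
def isBadLoop : List Char → Option Bool → Char → Int → Bool → Bool
  | [], _, _, _, triggered => triggered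
  | ch :: rest, up, nowCh, cnt, triggered =>
    if pvOrd ch ≠ pvOrd nowCh + 1 ∧ pvOrd ch ≠ pvOrd nowCh - 1 then false
    else if up = some true ∧ pvOrd ch = pvOrd nowCh - 1 then false
    else if up = some false ∧ pvOrd ch = pvOrd nowCh + 1 then false
    else if (up = none ∨ up = some false) ∧ pvOrd ch = pvOrd nowCh - 1 then
      isBadLoop rest (some false) ch (cnt + 1) (if cnt + 1 = 3 then true else triggered)
    else if (up = none ∨ up = some true) ∧ pvOrd ch = pvOrd nowCh + 1 then
      isBadLoop rest (some true) ch (cnt + 1) (if cnt + 1 = 3 then true else triggered)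
    else false

def isBad (seg : String) : Bool :=
  match seg.toList with
  | [] => false
  | c :: rest => isBadLoop rest none c 1 false

-- ===== PORT B =====
def isBad_alt (seg : String) : Bool :=
  let l := seg.toList
  if l.length < 3 then false
  else
    let d := List.zipWith (fun a b => pvOrd b - pvOrd a) l l.tail
    d.all (· == 1) || d.all (· == -1)

-- ===== PRECONDITION & SPEC =====
def Spec_isBad (seg : String) (out : Bool) : Prop := out = isBad_alt seg
instance (seg : String) (out : Bool) : Decidable (Spec_isBad seg out) := by unfold Spec_isBad; infer_instance

-- ===== CLAIM (what is proved, stated in full; the proofs are below) =====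
def Claim_equal_isBad : Prop := ∀ (seg : String), Dom_isBad seg → Spec_isBad seg (isBad seg)

-- ===== LEMMAS AND PROOFS =====

-- "xs continues c strictly ascending by 1" / "descending by 1"
def ascRun (c : Char) : List Char → Bool
  | [] => true
  | x :: xs => (pvOrd x == pvOrd c + 1) && ascRun x xs

def descRun (c : Char) : List Char → Bool
  | [] => true
  | x :: xs => (pvOrd x == pvOrd c - 1) && descRun x xs

theorem isBadLoop_true (rest : List Char) : ∀ (c : Char) (cnt : Int) (trig : Bool),
    isBadLoop rest (some true) c cnt trig
      = (ascRun c rest && (trig || decide (cnt ≤ 2 ∧ 3 ≤ cnt + rest.length))) := by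
  induction rest with
  | nil => intro c cnt trig; simp [isBadLoop, ascRun]; omega
  | cons x xs ih =>
    intro c cnt trig
    by_cases h1 : pvOrd x = pvOrd c + 1
    · have h2 : pvOrd x ≠ pvOrd c - 1 := by omega
      simp only [isBadLoop]
      rw [if_neg (fun h => h.1 h1), if_neg (fun h => h2 h.2),
          if_neg (fun h => absurd h.1 (by decide)), if_neg (fun h => h2 h.2),
          if_pos ⟨Or.inr trivial, h1⟩, ih]
      have hb : (pvOrd x == pvOrd c + 1) = true := by simp [h1]
      have hnn : (0 : Int) ≤ (xs.length : Int) := Int.natCast_nonneg _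
      simp only [ascRun, hb, Bool.true_and, List.length_cons, Nat.cast_add, Nat.cast_one]
      by_cases hc : cnt + 1 = 3
      · have h2' : cnt ≤ 2 := by omega
        have h3' : (3 : Int) ≤ cnt + ((xs.length : Int) + 1) := by omega
        simp [hc, h2', h3']
      · rw [if_neg hc]
        have e : (cnt + 1 ≤ 2 ∧ 3 ≤ cnt + 1 + (xs.length : Int))
            ↔ (cnt ≤ 2 ∧ 3 ≤ cnt + ((xs.length : Int) + 1)) := by omega
        rw [decide_eq_decide.mpr e]
    · by_cases h2 : pvOrd x = pvOrd c - 1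
      · simp only [isBadLoop]
        rw [if_neg (fun h => h.2 h2), if_pos ⟨trivial, h2⟩]
        have hb : (pvOrd x == pvOrd c + 1) = false := by simp [h1]
        simp [ascRun, hb]
      · simp only [isBadLoop]
        rw [if_pos ⟨h1, h2⟩]
        have hb : (pvOrd x == pvOrd c + 1) = false := by simp [h1]
        simp [ascRun, hb]

theorem isBadLoop_false (rest : List Char) : ∀ (c : Char) (cnt : Int) (trig : Bool),
    isBadLoop rest (some false) c cnt trig
      = (descRun c rest && (trig || decide (cnt ≤ 2 ∧ 3 ≤ cnt + rest.length))) := by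
  induction rest with
  | nil => intro c cnt trig; simp [isBadLoop, descRun]; omega
  | cons x xs ih =>
    intro c cnt trig
    by_cases h1 : pvOrd x = pvOrd c - 1
    · have h2 : pvOrd x ≠ pvOrd c + 1 := by omega
      simp only [isBadLoop]
      rw [if_neg (fun h => h.2 h1), if_neg (fun h => absurd h.1 (by decide)),
          if_neg (fun h => h2 h.2), if_pos ⟨Or.inr trivial, h1⟩, ih]
      have hb : (pvOrd x == pvOrd c - 1) = true := by simp [h1]
      have hnn : (0 : Int) ≤ (xs.length : Int) := Int.natCast_nonneg _
      simp only [descRun, hb, Bool.true_and, List.length_cons, Nat.cast_add, Nat.cast_one]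
      by_cases hc : cnt + 1 = 3
      · have h2' : cnt ≤ 2 := by omega
        have h3' : (3 : Int) ≤ cnt + ((xs.length : Int) + 1) := by omega
        simp [hc, h2', h3']
      · rw [if_neg hc]
        have e : (cnt + 1 ≤ 2 ∧ 3 ≤ cnt + 1 + (xs.length : Int))
            ↔ (cnt ≤ 2 ∧ 3 ≤ cnt + ((xs.length : Int) + 1)) := by omega
        rw [decide_eq_decide.mpr e]
    · by_cases h2 : pvOrd x = pvOrd c + 1
      · simp only [isBadLoop]
        rw [if_neg (fun h => h.1 h2), if_neg (fun h => absurd h.1 (by decide)),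
            if_pos ⟨trivial, h2⟩]
        have hb : (pvOrd x == pvOrd c - 1) = false := by simp [h1]
        simp [descRun, hb]
      · simp only [isBadLoop]
        rw [if_pos ⟨h2, h1⟩]
        have hb : (pvOrd x == pvOrd c - 1) = false := by simp [h1]
        simp [descRun, hb]

-- the diff list of B, all-ones, equals ascRun (and all-minus-ones equals descRun)
theorem zip_all_one (xs : List Char) : ∀ c : Char,
    (List.zipWith (fun a b => pvOrd b - pvOrd a) (c :: xs) xs).all (· == 1) = ascRun c xs := by
  induction xs with
  | nil => intro c; simp [ascRun]
  | cons x ys ih =>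
    intro c
    simp only [List.zipWith, List.all_cons, ascRun, ih]
    congr 1
    rw [Bool.eq_iff_iff]
    simp only [beq_iff_eq]
    omega

theorem zip_all_negone (xs : List Char) : ∀ c : Char,
    (List.zipWith (fun a b => pvOrd b - pvOrd a) (c :: xs) xs).all (· == -1) = descRun c xs := by
  induction xs with
  | nil => intro c; simp [descRun]
  | cons x ys ih =>
    intro c
    simp only [List.zipWith, List.all_cons, descRun, ih]
    congr 1
    rw [Bool.eq_iff_iff]
    simp only [beq_iff_eq]
    omega

-- ===== VERDICT (by name: the statement is the Claim_ definition above) =====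
theorem isBad_spec : Claim_equal_isBad := by
  intro seg _
  unfold Spec_isBad isBad isBad_alt
  cases hl : seg.toList with
  | nil => simp
  | cons c rest =>
    cases rest with
    | nil => simp [isBadLoop]
    | cons x xs =>
      simp only [List.tail_cons, List.zipWith, List.all_cons, zip_all_one, zip_all_negone]
      by_cases h1 : pvOrd x = pvOrd c + 1
      · have h2 : pvOrd x ≠ pvOrd c - 1 := by omega
        simp only [isBadLoop]
        rw [if_neg (fun h => h.1 h1), if_neg (fun h => absurd h.1 (by decide)),
            if_neg (fun h => absurd h.1 (by decide)), if_neg (fun h => h2 h.2),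
            if_pos ⟨Or.inl trivial, h1⟩, isBadLoop_true]
        have d1 : (pvOrd x - pvOrd c == 1) = true := by simp; omega
        have d2 : (pvOrd x - pvOrd c == -1) = false := by simp; omega
        cases xs with
        | nil => simp [ascRun]
        | cons y ys =>
          have hlen : ¬ (c :: x :: y :: ys).length < 3 := by
            simp only [List.length_cons]; omega
          rw [if_neg hlen]
          have hnn : (0 : Int) ≤ (ys.length : Int) := Int.natCast_nonneg _
          simp [d1, d2, List.length_cons, Nat.cast_add, Nat.cast_one]
          intro _
          omega
      · by_cases h2 : pvOrd x = pvOrd c - 1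
        · simp only [isBadLoop]
          rw [if_neg (fun h => h.2 h2), if_neg (fun h => absurd h.1 (by decide)),
              if_neg (fun h => absurd h.1 (by decide)), if_pos ⟨Or.inl trivial, h2⟩,
              isBadLoop_false]
          have d1 : (pvOrd x - pvOrd c == 1) = false := by simp; omega
          have d2 : (pvOrd x - pvOrd c == -1) = true := by simp; omega
          cases xs with
          | nil => simp [descRun]
          | cons y ys =>
            have hlen : ¬ (c :: x :: y :: ys).length < 3 := by
              simp only [List.length_cons]; omega
            rw [if_neg hlen]
            have hnn : (0 : Int) ≤ (ys.length : Int) := Int.natCast_nonneg _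
            simp [d1, d2, List.length_cons, Nat.cast_add, Nat.cast_one]
            intro _
            omega
        · simp only [isBadLoop]
          rw [if_pos ⟨h1, h2⟩]
          have d1 : (pvOrd x - pvOrd c == 1) = false := by simp; omega
          have d2 : (pvOrd x - pvOrd c == -1) = false := by simp; omega
          simp [d1, d2]
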